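-- pv_equiv track=rewrite | github.com/abhishekmshr956/Coursera_DataStructures_and_Algorithms_Specialization | AlgorithmicToolbox/greedy_algorithms/car_fuel.py | optimal_fuel_tank
-- ===== SOURCE A (Python) =====
-- def optimal_fuel_tank(current_f_index, max_travel, n_fueltanks, fueltanks):
--     fueltank_index = current_f_index
--     for i in range(current_f_index + 1, n_fueltanks):
--         if fueltanks[i] - fueltanks[current_f_index] <= max_travel:
--             fueltank_index = i
--         else:
--             break
--     return fueltank_index
-- ===== SOURCE B (Python) =====
-- def optimal_fuel_tank(current_f_index, max_travel, n_fueltanks, fueltanks):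
--     # Binary search (bisect_right with lo/hi bounds, hand-inlined) for the last
--     # reachable tank in the sorted range fueltanks[current_f_index+1:n_fueltanks].
--     lo, hi = current_f_index + 1, n_fueltanks
--     if lo >= hi:
--         return current_f_index
--     reach = fueltanks[current_f_index] + max_travel
--     while lo < hi:
--         mid = (lo + hi) // 2
--         if reach < fueltanks[mid]:
--             hi = mid
--         else:
--             lo = mid + 1
--     return lo - 1
-- ===== Notes on version B (the rewrite author's own statement) =====
-- stated objective: alternative
-- what changed: Replaces A's linear break-at-first-gap scan with an in-place bisect_right binary search over the sorted range fueltanks[current_f_index+1:n_fueltanks] (O(log n) comparisons vs A's O(n) worst case), under the car-fueling problem's sorted-distances precondition.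
-- outside the precondition, e.g. on optimal_fuel_tank(0, 5, 3, [0, 10, 4]): A returns 0, B returns 2; on optimal_fuel_tank(-3, 0, 3, [5, 0, 10]): A returns -2, B returns 1; on optimal_fuel_tank(0, 5, 5, [0, 10, 4]): A returns 0, B raises IndexError
import Mathlib
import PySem

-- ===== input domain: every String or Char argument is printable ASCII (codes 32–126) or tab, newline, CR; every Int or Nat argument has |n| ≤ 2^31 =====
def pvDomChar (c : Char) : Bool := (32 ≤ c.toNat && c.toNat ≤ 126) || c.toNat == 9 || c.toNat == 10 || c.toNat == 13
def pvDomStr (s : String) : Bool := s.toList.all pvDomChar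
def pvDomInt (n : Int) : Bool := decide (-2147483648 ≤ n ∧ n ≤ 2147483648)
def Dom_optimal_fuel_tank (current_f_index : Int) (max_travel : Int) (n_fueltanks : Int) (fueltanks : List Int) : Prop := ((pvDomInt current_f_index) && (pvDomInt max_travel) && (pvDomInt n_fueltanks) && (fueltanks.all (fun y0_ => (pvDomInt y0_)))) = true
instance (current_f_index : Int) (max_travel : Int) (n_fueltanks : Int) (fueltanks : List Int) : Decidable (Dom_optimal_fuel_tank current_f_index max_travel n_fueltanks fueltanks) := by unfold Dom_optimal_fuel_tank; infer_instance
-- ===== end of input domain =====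

-- B replaces A's linear break-at-first-gap scan by a bisect_right binary search over the
-- sorted window fueltanks[c+1:n] (the problem's sorted-distances domain).


-- ===== PORT A =====
-- A's for-loop with break: walk the range, remember the last index whose distance fits, stop at the first that does not.
def pvAgo (f : List Int) (c m : Int) : List Int → Int → Int
  | [], idx => idx
  | i :: rest, idx =>
    if PySem.List.pyGetD f i 0 - PySem.List.pyGetD f c 0 ≤ m then pvAgo f c m rest i
    else idx

def optimal_fuel_tank (current_f_index : Int) (max_travel : Int) (n_fueltanks : Int) (fueltanks : List Int) : Int :=
  pvAgo fueltanks current_f_index max_travel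
    (PySem.List.pyRange (current_f_index + 1) n_fueltanks 1) current_f_index

-- ===== PORT B =====
-- termination bounds for the binary-search midpoint (cited by pvBsearch's decreasing_by)
lemma pvMid_bounds (lo hi : Int) (h : lo < hi) :
    lo ≤ PySem.Int.floordiv (lo + hi) 2 ∧ PySem.Int.floordiv (lo + hi) 2 < hi :=
  ⟨(PySem.Int.le_floordiv_iff_mul_le (by omega)).mpr (by omega),
   (PySem.Int.floordiv_lt_iff_lt_mul (by omega)).mpr (by omega)⟩

-- Source B's while-loop: bisect_right(fueltanks, reach, lo, hi) hand-inlined, kept in place (no window copy)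
def pvBsearch (f : List Int) (reach : Int) (lo hi : Int) : Int :=
  if h : lo < hi then
    let mid := PySem.Int.floordiv (lo + hi) 2
    if reach < PySem.List.pyGetD f mid 0 then pvBsearch f reach lo mid
    else pvBsearch f reach (mid + 1) hi
  else lo
termination_by (hi - lo).toNat
decreasing_by
  · have := pvMid_bounds lo hi h; omega
  · have := pvMid_bounds lo hi h; omega

def optimal_fuel_tank_alt (current_f_index : Int) (max_travel : Int) (n_fueltanks : Int) (fueltanks : List Int) : Int :=
  if current_f_index + 1 ≥ n_fueltanks then current_f_index
  else
    pvBsearch fueltanks (PySem.List.pyGetD fueltanks current_f_index 0 + max_travel)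
      (current_f_index + 1) n_fueltanks - 1

-- ===== PRECONDITION & SPEC =====
-- Pre_ restricts the scanned region to the car-fueling problem's domain: a nonnegative start index,
-- n_fueltanks within the list, and a sorted window of distances; outside it (unsorted window, a
-- negative start's index wraparound, n_fueltanks overrunning the list, where A either raises
-- IndexError or returns an accidental early-break value) B's binary search legitimately disagrees.
def Pre_optimal_fuel_tank (current_f_index : Int) (max_travel : Int) (n_fueltanks : Int) (fueltanks : List Int) : Prop :=
  current_f_index + 1 < n_fueltanks →
    (0 ≤ current_f_index ∧ n_fueltanks ≤ (fueltanks.length : Int) ∧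
      List.Pairwise (· ≤ ·) (PySem.List.slice fueltanks (some (current_f_index + 1)) (some n_fueltanks)))
instance (current_f_index : Int) (max_travel : Int) (n_fueltanks : Int) (fueltanks : List Int) : Decidable (Pre_optimal_fuel_tank current_f_index max_travel n_fueltanks fueltanks) := by unfold Pre_optimal_fuel_tank; infer_instance

def pvWitness_optimal_fuel_tank : Int × Int × Int × List Int := (0, 5, 3, [0, 3, 10])

def Spec_optimal_fuel_tank (current_f_index : Int) (max_travel : Int) (n_fueltanks : Int) (fueltanks : List Int) (out : Int) : Prop := out = optimal_fuel_tank_alt current_f_index max_travel n_fueltanks fueltanks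
instance (current_f_index : Int) (max_travel : Int) (n_fueltanks : Int) (fueltanks : List Int) (out : Int) : Decidable (Spec_optimal_fuel_tank current_f_index max_travel n_fueltanks fueltanks out) := by unfold Spec_optimal_fuel_tank; infer_instance

-- ===== CLAIM (what is proved, stated in full; the proofs are below) =====
def Claim_equal_optimal_fuel_tank : Prop := ∀ (current_f_index : Int) (max_travel : Int) (n_fueltanks : Int) (fueltanks : List Int), Dom_optimal_fuel_tank current_f_index max_travel n_fueltanks fueltanks → Pre_optimal_fuel_tank current_f_index max_travel n_fueltanks fueltanks → Spec_optimal_fuel_tank current_f_index max_travel n_fueltanks fueltanks (optimal_fuel_tank current_f_index max_travel n_fueltanks fueltanks)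

-- ===== LEMMAS AND PROOFS =====

-- A's loop returns the last index r of a gap-free prefix of [lo, n): everything in [lo, r]
-- fits within max_travel of f[c], and r+1 (if still in range) does not.
lemma pvAgo_spec (f : List Int) (c m n : Int) :
    ∀ (fuel : Nat) (lo : Int), (n - lo).toNat ≤ fuel → lo ≤ n →
      lo - 1 ≤ pvAgo f c m (PySem.List.pyRange lo n 1) (lo - 1) ∧
      pvAgo f c m (PySem.List.pyRange lo n 1) (lo - 1) < n ∧
      (∀ k : Int, lo ≤ k → k ≤ pvAgo f c m (PySem.List.pyRange lo n 1) (lo - 1) →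
        PySem.List.pyGetD f k 0 - PySem.List.pyGetD f c 0 ≤ m) ∧
      (pvAgo f c m (PySem.List.pyRange lo n 1) (lo - 1) + 1 < n →
        ¬ (PySem.List.pyGetD f (pvAgo f c m (PySem.List.pyRange lo n 1) (lo - 1) + 1) 0
            - PySem.List.pyGetD f c 0 ≤ m)) := by
  intro fuel
  induction fuel with
  | zero =>
    intro lo hf hle
    have hlo : lo = n := by omega
    subst hlo
    rw [PySem.List.pyRange_one_eq_nil (le_refl _)]
    simp only [pvAgo]
    refine ⟨by omega, by omega, ?_, ?_⟩
    · intro k hk1 hk2; omega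
    · intro hlt; omega
  | succ fuel ih =>
    intro lo hf hle
    by_cases hlt : lo < n
    · rw [PySem.List.pyRange_one_cons hlt]
      simp only [pvAgo]
      by_cases hp : PySem.List.pyGetD f lo 0 - PySem.List.pyGetD f c 0 ≤ m
      · rw [if_pos hp]
        have hacc : (lo + 1) - 1 = lo := by ring
        have H := ih (lo + 1) (by omega) (by omega)
        rw [hacc] at H
        obtain ⟨h1, h2, h3, h4⟩ := H
        refine ⟨by omega, h2, ?_, h4⟩
        intro k hk1 hk2
        rcases eq_or_lt_of_le hk1 with heq | hgt
        · rw [← heq]; exact hp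
        · exact h3 k (by omega) hk2
      · rw [if_neg hp]
        refine ⟨le_refl _, by omega, ?_, ?_⟩
        · intro k hk1 hk2; omega
        · intro _
          have he : lo - 1 + 1 = lo := by ring
          rw [he]; exact hp
    · have hlo : lo = n := by omega
      subst hlo
      rw [PySem.List.pyRange_one_eq_nil (le_refl _)]
      simp only [pvAgo]
      refine ⟨by omega, by omega, ?_, ?_⟩
      · intro k hk1 hk2; omega
      · intro hltn; omega

-- elements of the window are the pyGetD-reads A performs
lemma pvWindow_getElem (f : List Int) (c n : Int) (hc : 0 ≤ c) (hlt : c + 1 < n) (hn : n ≤ (f.length : Int))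
    (j : Nat) (hj : j < (PySem.List.slice f (some (c + 1)) (some n)).length) :
    (PySem.List.slice f (some (c + 1)) (some n))[j] = PySem.List.pyGetD f ((c + 1) + (j : Int)) 0 := by
  have h0 : (0:Int) ≤ c + 1 := by omega
  have h0n : (0:Int) ≤ n := by omega
  simp only [PySem.List.slice_toNat f h0 h0n, List.length_take, List.length_drop] at hj
  simp only [PySem.List.slice_toNat f h0 h0n]
  have hjf : (c + 1).toNat + j < f.length := by omega
  rw [List.getElem_take, List.getElem_drop, PySem.List.pyGetD_eq_getElem f 0 (by omega) (by omega)]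
  congr 1
  omega

lemma pvWindow_length (f : List Int) (c n : Int) (hc : 0 ≤ c) (hlt : c + 1 < n)
    (hn : n ≤ (f.length : Int)) :
    ((PySem.List.slice f (some (c + 1)) (some n)).length : Int) = n - (c + 1) := by
  rw [PySem.List.slice_toNat f (by omega) (by omega)]
  simp only [List.length_take, List.length_drop]
  omega

-- B's binary search narrows [lo, hi) keeping everything left of lo within reach and everything
-- from hi on out of reach; on a monotone range it lands on the first out-of-reach index.
lemma pvBsearch_spec (f : List Int) (x lo0 hi0 : Int)
    (hmono : ∀ k k' : Int, lo0 ≤ k → k ≤ k' → k' < hi0 →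
      PySem.List.pyGetD f k 0 ≤ PySem.List.pyGetD f k' 0) :
    ∀ (fuel : Nat) (lo hi : Int), (hi - lo).toNat ≤ fuel → lo0 ≤ lo → lo ≤ hi → hi ≤ hi0 →
      (∀ k : Int, lo0 ≤ k → k < lo → PySem.List.pyGetD f k 0 ≤ x) →
      (∀ k : Int, hi ≤ k → k < hi0 → x < PySem.List.pyGetD f k 0) →
      lo0 ≤ pvBsearch f x lo hi ∧ pvBsearch f x lo hi ≤ hi0 ∧
      (∀ k : Int, lo0 ≤ k → k < pvBsearch f x lo hi → PySem.List.pyGetD f k 0 ≤ x) ∧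
      (∀ k : Int, pvBsearch f x lo hi ≤ k → k < hi0 → x < PySem.List.pyGetD f k 0) := by
  intro fuel
  induction fuel with
  | zero =>
    intro lo hi hf h1 h2 h3 hok hbad
    have hlh : lo = hi := by omega
    rw [pvBsearch, dif_neg (by omega)]
    exact ⟨h1, by omega, hok, by intro k hk1 hk2; exact hbad k (by omega) hk2⟩
  | succ fuel ih =>
    intro lo hi hf h1 h2 h3 hok hbad
    by_cases hlt : lo < hi
    · rw [pvBsearch, dif_pos hlt]
      obtain ⟨hm1, hm2⟩ := pvMid_bounds lo hi hlt
      set mid := PySem.Int.floordiv (lo + hi) 2 with hmid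
      by_cases hp : x < PySem.List.pyGetD f mid 0
      · rw [if_pos hp]
        refine ih lo mid (by omega) h1 (by omega) (by omega) hok ?_
        intro k hk1 hk2
        exact lt_of_lt_of_le hp (hmono mid k (by omega) hk1 hk2)
      · rw [if_neg hp]
        refine ih (mid + 1) hi (by omega) (by omega) (by omega) h3 ?_ hbad
        intro k hk1 hk2
        rcases lt_or_ge k lo with hkl | hkl
        · exact hok k hk1 hkl
        · exact le_trans (hmono k mid hk1 (by omega) (by omega)) (by omega)
    · have hlh : lo = hi := by omega
      rw [pvBsearch, dif_neg (by omega)]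
      exact ⟨h1, by omega, hok, by intro k hk1 hk2; exact hbad k (by omega) hk2⟩

-- ===== VERDICT (by name: the statement is the Claim_ definition above) =====
theorem optimal_fuel_tank_spec : Claim_equal_optimal_fuel_tank := by
  intro c m n f _hdom hpre
  unfold Spec_optimal_fuel_tank optimal_fuel_tank optimal_fuel_tank_alt
  by_cases h : c + 1 < n
  · obtain ⟨hc, hn, hsorted⟩ := hpre h
    rw [if_neg (by omega)]
    set window := PySem.List.slice f (some (c + 1)) (some n) with hwindow
    have hwlen : ((window).length : Int) = n - (c + 1) := pvWindow_length f c n hc h hn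
    -- the scanned range is monotone: two reads in [c+1, n) are two entries of the sorted window
    have hmono : ∀ k k' : Int, c + 1 ≤ k → k ≤ k' → k' < n →
        PySem.List.pyGetD f k 0 ≤ PySem.List.pyGetD f k' 0 := by
      intro k k' hk hkk hk'
      rcases eq_or_lt_of_le hkk with heq | hlt
      · rw [heq]
      · have hjw : (k - (c + 1)).toNat < window.length := by omega
        have hjw' : (k' - (c + 1)).toNat < window.length := by omega
        have e1 := pvWindow_getElem f c n hc h hn _ hjw
        have e2 := pvWindow_getElem f c n hc h hn _ hjw'
        have he1 : (c + 1) + (((k - (c + 1)).toNat : Nat) : Int) = k := by omega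
        have he2 : (c + 1) + (((k' - (c + 1)).toNat : Nat) : Int) = k' := by omega
        rw [he1] at e1; rw [he2] at e2
        have := List.pairwise_iff_getElem.mp hsorted _ _ hjw hjw' (by omega)
        rw [e1, e2] at this
        exact this
    obtain ⟨hJ1, hJ2, hJok, hJbad⟩ :=
      pvBsearch_spec f (PySem.List.pyGetD f c 0 + m) (c + 1) n hmono
        (n - (c + 1)).toNat (c + 1) n (by omega) (by omega) (by omega) (by omega)
        (by intro k hk1 hk2; omega) (by intro k hk1 hk2; omega)
    set J := pvBsearch f (PySem.List.pyGetD f c 0 + m) (c + 1) n with hJdef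
    obtain ⟨hr1, hr2, hrok, hrbad⟩ :=
      pvAgo_spec f c m n (n - (c + 1)).toNat (c + 1) (by omega) (by omega)
    have hacc : c + 1 - 1 = c := by ring
    rw [hacc] at hr1 hr2 hrok hrbad
    set r := pvAgo f c m (PySem.List.pyRange (c + 1) n 1) c with hrdef
    rcases lt_trichotomy r (J - 1) with hcmp | hcmp | hcmp
    · exfalso
      have hbad := hrbad (by omega)
      have hok := hJok (r + 1) (by omega) (by omega)
      omega
    · exact hcmp
    · exfalso
      have hbad := hJbad J (le_refl _) (by omega)
      have hok := hrok J (by omega) (by omega)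
      omega
  · rw [if_pos (by omega), PySem.List.pyRange_one_eq_nil (by omega)]
    simp only [pvAgo]
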